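-- pv_equiv track=rewrite | github.com/alporak/aterminal | modules/gps_codes.py | decode_reason
-- ===== SOURCE A (Python) =====
-- REASON_MAP = {
--     0:  ("Signal Quality Low", "Receiver flagged signal as weak/invalid."),
--     1:  ("Bad Latitude", "Lat outside valid range (-90 to 90)."),
--     2:  ("Bad Longitude", "Lon outside valid range (-180 to 180)."),
--     3:  ("Bad Speed", "Speed exceeds max limits (Drift/Jump)."),
--     4:  ("Bad Angle", "Heading angle invalid."),
--     5:  ("Bad HDOP", "HDOP too high (Urban Canyon effect)."),
--     6:  ("Speed Filter Jump", "Impossible acceleration detected."),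
--     7:  ("Abnormal Speed", "App logic flagged speed as inconsistent."),
--     8:  ("GPS Off / Forced", "GPS manually requested OFF or Sleep mode."),
--     9:  ("RMC Status Invalid", "NMEA RMC status is 'V' (Void)."),
--     10: ("Minimum Satellites", "Sats in use < MINSAT (4)."),
--     11: ("Precision Error", "PDOP/HDOP are exactly 0.0 (Warm-up)."),
--     12: ("NaN Latitude", "Latitude is Not a Number."),
--     13: ("NaN Longitude", "Longitude is Not a Number."),
--     14: ("LPM Filtered", "Low Power Mode logic ignored fix."),
--     15: ("Abnormal Altitude", "Altitude jumped drastically.")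
-- }
--
-- def decode_reason(code):
--     """Returns a list of short reason strings for a given integer code."""
--     if code is None: return []
--     reasons = []
--     # If code is 0, it usually means no error *flags*, but if Fix=0, it's just searching.
--     if code == 0: return ["Searching / No Error Flags"]
--
--     for bit, (short_desc, _) in REASON_MAP.items():
--         if code & (1 << bit):
--             reasons.append(short_desc)
--     return reasons
-- ===== SOURCE B (Python) =====
-- REASON_MAP = {
--     0:  ("Signal Quality Low", "Receiver flagged signal as weak/invalid."),
--     1:  ("Bad Latitude", "Lat outside valid range (-90 to 90)."),
--     2:  ("Bad Longitude", "Lon outside valid range (-180 to 180)."),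
--     3:  ("Bad Speed", "Speed exceeds max limits (Drift/Jump)."),
--     4:  ("Bad Angle", "Heading angle invalid."),
--     5:  ("Bad HDOP", "HDOP too high (Urban Canyon effect)."),
--     6:  ("Speed Filter Jump", "Impossible acceleration detected."),
--     7:  ("Abnormal Speed", "App logic flagged speed as inconsistent."),
--     8:  ("GPS Off / Forced", "GPS manually requested OFF or Sleep mode."),
--     9:  ("RMC Status Invalid", "NMEA RMC status is 'V' (Void)."),
--     10: ("Minimum Satellites", "Sats in use < MINSAT (4)."),
--     11: ("Precision Error", "PDOP/HDOP are exactly 0.0 (Warm-up)."),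
--     12: ("NaN Latitude", "Latitude is Not a Number."),
--     13: ("NaN Longitude", "Longitude is Not a Number."),
--     14: ("LPM Filtered", "Low Power Mode logic ignored fix."),
--     15: ("Abnormal Altitude", "Altitude jumped drastically.")
-- }
--
-- # Precomputed lookup tables: every possible low/high byte of the 16-bit flag word
-- # is decoded once at import time, so a call does no bit testing at all.
-- _LO = [[REASON_MAP[j][0] for j in range(8) if (b >> j) & 1] for b in range(256)]
-- _HI = [[REASON_MAP[8 + j][0] for j in range(8) if (b >> j) & 1] for b in range(256)]
--
-- def decode_reason(code):
--     """Returns a list of short reason strings for a given integer code."""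
--     if code is None: return []
--     if code == 0: return ["Searching / No Error Flags"]
--     m = code & 0xFFFF
--     return _LO[m % 256] + _HI[m // 256]
-- ===== Notes on version B (the rewrite author's own statement) =====
-- stated objective: alternative
-- what changed: B replaces A's per-call scan of all 16 REASON_MAP entries with two 256-entry lookup tables precomputed at import time (one per byte of the 16-bit flag word); a call masks the code once, splits it into low/high byte and concatenates the two precomputed name lists, doing no bit testing at call time.
import Mathlib
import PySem

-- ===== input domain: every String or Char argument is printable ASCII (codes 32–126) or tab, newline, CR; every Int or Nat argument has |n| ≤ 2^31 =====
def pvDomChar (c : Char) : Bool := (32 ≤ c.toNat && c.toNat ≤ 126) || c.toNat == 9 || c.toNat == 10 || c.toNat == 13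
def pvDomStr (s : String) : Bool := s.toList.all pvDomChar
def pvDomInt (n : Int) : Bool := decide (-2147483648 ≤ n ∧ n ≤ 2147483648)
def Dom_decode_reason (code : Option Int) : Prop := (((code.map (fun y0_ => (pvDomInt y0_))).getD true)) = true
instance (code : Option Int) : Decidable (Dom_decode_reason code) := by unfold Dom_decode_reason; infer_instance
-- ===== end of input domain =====

-- B precomputes two 256-entry byte-decoding tables once and answers a call with two table
-- lookups and a concatenation, instead of A's per-call scan of all 16 map entries; same
-- return value (objective: alternative).

-- ===== PORT A =====
-- REASON_MAP.items() in insertion order: (bit, (short_desc, long_desc))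
def reasonMap : List (Nat × String × String) :=
  [(0, "Signal Quality Low", "Receiver flagged signal as weak/invalid."),
   (1, "Bad Latitude", "Lat outside valid range (-90 to 90)."),
   (2, "Bad Longitude", "Lon outside valid range (-180 to 180)."),
   (3, "Bad Speed", "Speed exceeds max limits (Drift/Jump)."),
   (4, "Bad Angle", "Heading angle invalid."),
   (5, "Bad HDOP", "HDOP too high (Urban Canyon effect)."),
   (6, "Speed Filter Jump", "Impossible acceleration detected."),
   (7, "Abnormal Speed", "App logic flagged speed as inconsistent."),
   (8, "GPS Off / Forced", "GPS manually requested OFF or Sleep mode."),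
   (9, "RMC Status Invalid", "NMEA RMC status is 'V' (Void)."),
   (10, "Minimum Satellites", "Sats in use < MINSAT (4)."),
   (11, "Precision Error", "PDOP/HDOP are exactly 0.0 (Warm-up)."),
   (12, "NaN Latitude", "Latitude is Not a Number."),
   (13, "NaN Longitude", "Longitude is Not a Number."),
   (14, "LPM Filtered", "Low Power Mode logic ignored fix."),
   (15, "Abnormal Altitude", "Altitude jumped drastically.")]

def decode_reason (code : Option Int) : List String :=
  match code with
  | none => []
  | some c =>
    if c = 0 then ["Searching / No Error Flags"]
    else
      reasonMap.foldl
        (fun reasons e =>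
          if PySem.Int.band c ((1 : Int) <<< e.1) ≠ 0 then reasons ++ [e.2.1] else reasons)
        []

-- ===== PORT B =====
-- REASON_MAP[k][0] for k = 0..15 (the table builder only reads indices 0..15, so the dict
-- lookup always hits; getD's default is unreachable)
def shortNames : List String :=
  ["Signal Quality Low", "Bad Latitude", "Bad Longitude", "Bad Speed", "Bad Angle", "Bad HDOP",
   "Speed Filter Jump", "Abnormal Speed", "GPS Off / Forced", "RMC Status Invalid",
   "Minimum Satellites", "Precision Error", "NaN Latitude", "NaN Longitude", "LPM Filtered",
   "Abnormal Altitude"]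

-- the import-time comprehension: decode every possible byte value once
-- (_LO = byteTable 0, _HI = byteTable 8)
def byteTable (off : Nat) : List (List String) :=
  (List.range 256).map (fun b =>
    (List.range 8).filterMap (fun j =>
      if (b >>> j) &&& 1 = 1 then some (shortNames.getD (off + j) "") else none))

def decode_reason_alt (code : Option Int) : List String :=
  match code with
  | none => []
  | some c =>
    if c = 0 then ["Searching / No Error Flags"]
    else
      let m := (PySem.Int.band c 0xFFFF).toNat
      (byteTable 0).getD (m % 256) [] ++ (byteTable 8).getD (m / 256) []

-- ===== PRECONDITION & SPEC =====
def Spec_decode_reason (code : Option Int) (out : List String) : Prop := out = decode_reason_alt code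
instance (code : Option Int) (out : List String) : Decidable (Spec_decode_reason code out) := by unfold Spec_decode_reason; infer_instance

-- ===== CLAIM (what is proved, stated in full; the proofs are below) =====
def Claim_equal_decode_reason : Prop := ∀ (code : Option Int), Dom_decode_reason code → Spec_decode_reason code (decode_reason code)

-- ===== LEMMAS AND PROOFS =====

theorem band_neg_left (c b : Int) (hc : c < 0) (hb : 0 ≤ b) :
    PySem.Int.band c b = ((b.toNat - (b.toNat &&& (-c - 1).toNat) : Nat) : Int) := by
  unfold PySem.Int.band
  rw [if_neg (by omega), if_pos hb]

theorem band_mask_lt (c : Int) : (PySem.Int.band c 0xFFFF).toNat < 2 ^ 16 := by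
  rcases le_or_gt 0 c with hc | hc
  · rw [PySem.Int.band_of_nonneg hc (by norm_num),
        show (0xFFFF : Int).toNat = 2 ^ 16 - 1 by decide, Nat.and_two_pow_sub_one_eq_mod]
    have := Nat.mod_lt c.toNat (show 0 < 2 ^ 16 by norm_num)
    omega
  · rw [band_neg_left _ _ hc (by norm_num), Int.toNat_natCast]
    omega

-- A's per-entry test 'c & (1 << k)' seen through the 16-bit mask B applies once
theorem band_testBit (c : Int) (k : Nat) (hk : k < 16) :
    (PySem.Int.band c ((1 : Int) <<< (k : Int)) ≠ 0) =
      (((PySem.Int.band c 0xFFFF).toNat).testBit k = true) := by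
  have hsh : ((1 : Int) <<< (k : Int)) = ((2 ^ k : Nat) : Int) := Int.one_shiftLeft k
  rcases le_or_gt 0 c with hc | hc
  · rw [hsh, PySem.Int.band_of_nonneg hc (Int.natCast_nonneg _),
        PySem.Int.band_of_nonneg hc (by norm_num)]
    rw [Int.toNat_natCast, show (0xFFFF : Int).toNat = 2 ^ 16 - 1 by decide,
        Nat.and_two_pow, Nat.and_two_pow_sub_one_eq_mod, Int.toNat_natCast,
        Nat.testBit_mod_two_pow]
    cases c.toNat.testBit k <;> simp [hk]
  · rw [hsh, band_neg_left _ _ hc (Int.natCast_nonneg _),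
        band_neg_left _ _ hc (by norm_num)]
    rw [Int.toNat_natCast, show (0xFFFF : Int).toNat = 2 ^ 16 - 1 by decide,
        Nat.and_comm _ ((-c - 1).toNat), Nat.and_comm _ ((-c - 1).toNat),
        Nat.and_two_pow, Nat.and_two_pow_sub_one_eq_mod, Int.toNat_natCast]
    rw [eq_iff_iff, Nat.toNat_testBit, Nat.testBit_eq_decide_div_mod_eq]
    simp only [ne_eq, Int.natCast_eq_zero, decide_eq_true_eq]
    interval_cases k <;> omega

-- A's foldl with 'reasons ++ [name]' turned into a foldr that conses the kept names
theorem foldl_reason (c : Int) :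
    ∀ (l : List (Nat × String × String)) (acc : List String),
      l.foldl
        (fun reasons e =>
          if PySem.Int.band c ((1 : Int) <<< e.1) ≠ 0 then reasons ++ [e.2.1] else reasons) acc =
        acc ++ l.foldr
          (fun e r => if PySem.Int.band c ((1 : Int) <<< e.1) ≠ 0 then e.2.1 :: r else r) [] := by
  intro l
  induction l with
  | nil => intro acc; simp
  | cons x xs ih =>
    intro acc
    simp only [List.foldl_cons, List.foldr_cons]
    split_ifs with hx
    · rw [ih]; simp
    · rw [ih]

-- a cons-if foldr is a filterMap
theorem foldr_if_eq_filterMap {α β : Type} (q : α → Prop) [DecidablePred q] (f : α → β)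
    (l : List α) :
    l.foldr (fun a acc => if q a then f a :: acc else acc) [] =
      l.filterMap (fun a => if q a then some (f a) else none) := by
  induction l with
  | nil => rfl
  | cons x xs ih => simp only [List.foldr_cons, List.filterMap_cons]; split_ifs <;> simp [ih]

-- the long descriptions, used only to rewrite reasonMap as a map over range 16
def longDescs : List String :=
  ["Receiver flagged signal as weak/invalid.", "Lat outside valid range (-90 to 90).",
   "Lon outside valid range (-180 to 180).", "Speed exceeds max limits (Drift/Jump).",
   "Heading angle invalid.", "HDOP too high (Urban Canyon effect).",
   "Impossible acceleration detected.", "App logic flagged speed as inconsistent.",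
   "GPS manually requested OFF or Sleep mode.", "NMEA RMC status is 'V' (Void).",
   "Sats in use < MINSAT (4).", "PDOP/HDOP are exactly 0.0 (Warm-up).",
   "Latitude is Not a Number.", "Longitude is Not a Number.",
   "Low Power Mode logic ignored fix.", "Altitude jumped drastically."]

theorem reasonMap_eq_map :
    reasonMap = (List.range 16).map (fun j => (j, shortNames.getD j "", longDescs.getD j "")) := by
  rfl

-- what a table lookup returns, for any byte value
theorem byteTable_getD (off b : Nat) (hb : b < 256) :
    (byteTable off).getD b [] =
      (List.range 8).filterMap (fun j =>
        if b.testBit j then some (shortNames.getD (off + j) "") else none) := by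
  unfold byteTable
  rw [List.getD_eq_getElem _ _ (by simpa using hb), List.getElem_map, List.getElem_range]
  congr 1
  funext j
  congr 1
  rw [eq_iff_iff, Nat.testBit, Nat.and_one_is_mod, Nat.mod_two_eq_one_iff_testBit_zero,
      Nat.testBit_shiftRight, Nat.add_zero, Nat.testBit]

-- ===== VERDICT (by name: the statement is the Claim_ definition above) =====
theorem decode_reason_spec : Claim_equal_decode_reason := by
  intro code _
  unfold Spec_decode_reason decode_reason decode_reason_alt
  cases code with
  | none => rfl
  | some c =>
    by_cases hc : c = 0
    · simp [hc]
    · simp only [if_neg hc]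
      set m := (PySem.Int.band c 0xFFFF).toNat with hm
      have hm16 : m < 2 ^ 16 := band_mask_lt c
      rw [foldl_reason c reasonMap [], reasonMap_eq_map, List.foldr_map, List.nil_append]
      trans (List.range 16).foldr
        (fun j r => if m.testBit j then shortNames.getD j "" :: r else r) []
      · apply List.foldr_ext
        intro j hj r
        dsimp only
        simp only [band_testBit c j (List.mem_range.mp hj)]
        rw [← hm]
      · rw [foldr_if_eq_filterMap (fun j : Nat => m.testBit j = true)
              (fun j => shortNames.getD j "")]
        rw [byteTable_getD 0 (m % 256) (Nat.mod_lt _ (by norm_num)),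
            byteTable_getD 8 (m / 256) (by omega)]
        rw [show (16 : Nat) = 8 + 8 by rfl, List.range_add, List.filterMap_append,
            List.filterMap_map]
        congr 1
        · apply List.filterMap_congr
          intro j hj
          have hj8 : j < 8 := List.mem_range.mp hj
          rw [show m % 256 = m % 2 ^ 8 by norm_num, Nat.testBit_mod_two_pow]
          cases m.testBit j <;> simp [hj8]
        · apply List.filterMap_congr
          intro j hj
          dsimp only [Function.comp]
          rw [show m / 256 = m >>> 8 by rw [Nat.shiftRight_eq_div_pow],
              Nat.testBit_shiftRight]
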